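-- pv_equiv track=rewrite | github.com/doymi01/DoylesSDK-dev | src/doyles_sdk/_utilities copy.py | union_keys
-- ===== SOURCE A (Python) =====
-- from concurrent.futures import ThreadPoolExecutor
--
-- def union_keys(dict_list: list[dict], use_threads: bool = True) -> set:
--     """
--     Returns the union of keys from a list of dictionaries.
--
--     Args:
--         dict_list (list[dict]): List of dictionaries.
--         use_threads (bool, optional): Use ThreadPoolExecutor if True. Defaults to True.
--
--     Returns:
--         set: Set of all keys found in any dictionary.
--     """
--     if not dict_list:
--         return set()
--
--     if use_threads:
--
--         def get_keys(d):
--             return set(d.keys())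
--
--         with ThreadPoolExecutor() as executor:
--             key_sets = list(executor.map(get_keys, dict_list))
--         return set().union(*key_sets)
--     else:
--         return set().union(*[d.keys() for d in dict_list])
-- ===== SOURCE B (Python) =====
-- def union_keys(dict_list: list[dict], use_threads: bool = True) -> set:
--     """Union of keys across a list of dicts: one flat accumulating pass, no threading."""
--     result = set()
--     for d in dict_list:
--         result.update(d)
--     return result
-- ===== Notes on version B (the rewrite author's own statement) =====
-- stated objective: simpler
-- what changed: Replaced the flag dispatch (ThreadPoolExecutor map of a get_keys helper + set().union(*key_sets) vs a comprehension fold) with a single accumulating loop that updates one set with each dict's keys, ignoring use_threads and the empty-list guard.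
import Mathlib
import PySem

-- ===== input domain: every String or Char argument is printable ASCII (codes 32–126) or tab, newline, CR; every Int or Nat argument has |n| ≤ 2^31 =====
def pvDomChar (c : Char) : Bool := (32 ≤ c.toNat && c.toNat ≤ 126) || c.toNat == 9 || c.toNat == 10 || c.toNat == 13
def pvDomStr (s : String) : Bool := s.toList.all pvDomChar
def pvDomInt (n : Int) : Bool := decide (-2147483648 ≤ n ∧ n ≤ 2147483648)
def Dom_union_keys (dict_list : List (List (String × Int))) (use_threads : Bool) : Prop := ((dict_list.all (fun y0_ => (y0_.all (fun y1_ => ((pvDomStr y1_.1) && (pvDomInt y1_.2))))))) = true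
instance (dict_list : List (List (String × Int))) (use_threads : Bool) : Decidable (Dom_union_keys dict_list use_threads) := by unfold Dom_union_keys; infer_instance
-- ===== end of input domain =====

-- B replaces A's use_threads dispatch (per-dict key sets + set().union fold) with one
-- flat accumulating loop updating a single set; same result, simpler decomposition.
-- ===== PORT A =====
-- A: if not dict_list: return set(); if use_threads: key_sets = [set(d.keys()) for d in dict_list]
--    (executor.map is order-preserving, so a sequential map is exact); return set().union(*key_sets)
--    else: return set().union(*[d.keys() for d in dict_list])
def union_keys (dict_list : List (List (String × Int))) (use_threads : Bool) : List String :=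
  if dict_list = [] then PySem.Set.empty
  else if use_threads then
    let key_sets := dict_list.map (fun d => PySem.Set.ofList ((d.map Prod.fst)))
    key_sets.foldl PySem.Set.union PySem.Set.empty
  else
    (dict_list.map (fun d => (d.map Prod.fst))).foldl
      (fun s ks => PySem.Set.update s ks) PySem.Set.empty

-- ===== PORT B =====
-- B: result = set(); for d in dict_list: result.update(d); return result
def union_keys_alt (dict_list : List (List (String × Int))) (use_threads : Bool) : List String :=
  dict_list.foldl (fun result d => PySem.Set.update result ((d.map Prod.fst))) PySem.Set.empty

-- ===== PRECONDITION & SPEC =====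
def Spec_union_keys (dict_list : List (List (String × Int))) (use_threads : Bool) (out : List String) : Prop := out = union_keys_alt dict_list use_threads
instance (dict_list : List (List (String × Int))) (use_threads : Bool) (out : List String) : Decidable (Spec_union_keys dict_list use_threads out) := by unfold Spec_union_keys; infer_instance

-- ===== CLAIM (what is proved, stated in full; the proofs are below) =====
def Claim_equal_union_keys : Prop := ∀ (dict_list : List (List (String × Int))) (use_threads : Bool), Dom_union_keys dict_list use_threads → Spec_union_keys dict_list use_threads (union_keys dict_list use_threads)

-- ===== LEMMAS AND PROOFS =====

-- Updating with set(t) is the same as updating with t (duplicates are skipped by add).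
theorem pv_update_ofList {α : Type} [BEq α] [LawfulBEq α] (s : PySem.Set α) (t : List α) :
    PySem.Set.update s (PySem.Set.ofList t) = PySem.Set.update s t := by
  rw [PySem.Set.update_eq_append_filter, PySem.Set.update_eq_append_filter,
    PySem.Set.ofList_ofList]

-- ===== VERDICT (by name: the statement is the Claim_ definition above) =====
theorem union_keys_spec : Claim_equal_union_keys := by
  intro dict_list use_threads _
  unfold Spec_union_keys union_keys union_keys_alt
  by_cases hnil : dict_list = []
  · simp [hnil]
  · simp only [if_neg hnil, List.foldl_map]
    cases use_threads with
    | false => simp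
    | true =>
      simp only [PySem.Set.union_eq_update]
      exact PySem.List.foldl_congr_mem _ _ _ _ (fun s d _ => pv_update_ofList s (d.map Prod.fst))
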